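-- pv_equiv track=rewrite | github.com/daniel-reich/ubiquitous-fiesta | sHJmjMcZPiCsEujk6_22.py | pilish_string
-- ===== SOURCE A (Python) =====
-- def pilish_string(txt):
--   lst = [3,1,4,1,5,9,2,6,5,3,5,8,9,7,9]
--   if txt=='': return ''
--   res=[txt[0]]
--   count =0
--   for x in txt[1:sum(lst)]:
--     if len(res[-1])< lst[count]:res[-1]+=x
--     else:
--       res.append(x)
--       count+=1
--   while len(res[-1])!= lst[count]:
--     res[-1]+= res[-1][-1]
--   return ' '.join(res)
-- ===== SOURCE B (Python) =====
-- def pilish_string(txt):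
--     lst = [3, 1, 4, 1, 5, 9, 2, 6, 5, 3, 5, 8, 9, 7, 9]
--     if txt == '':
--         return ''
--     res = []
--     start = 0
--     for length in lst:
--         if start >= len(txt):
--             break
--         chunk = txt[start:start + length]
--         if len(chunk) < length:
--             chunk = chunk + chunk[-1] * (length - len(chunk))
--         res.append(chunk)
--         start += length
--     return ' '.join(res)
-- ===== Notes on version B (the rewrite author's own statement) =====
-- stated objective: simpler
-- what changed: B precomputes nothing per character: it slices the text word-by-word at the pi-digit lengths with a running start offset and pads only the final short slice, instead of A's character-by-character growth of res[-1] with a count index and a trailing while-loop.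
import Mathlib
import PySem

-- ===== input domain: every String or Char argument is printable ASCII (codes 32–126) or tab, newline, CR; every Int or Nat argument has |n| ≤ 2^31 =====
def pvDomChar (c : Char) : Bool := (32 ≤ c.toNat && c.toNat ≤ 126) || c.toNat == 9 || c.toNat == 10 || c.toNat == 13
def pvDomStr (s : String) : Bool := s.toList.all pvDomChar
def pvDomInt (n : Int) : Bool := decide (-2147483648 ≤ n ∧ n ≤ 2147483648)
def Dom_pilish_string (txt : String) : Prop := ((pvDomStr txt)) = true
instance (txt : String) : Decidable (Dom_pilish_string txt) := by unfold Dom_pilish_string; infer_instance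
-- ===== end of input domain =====

-- B re-implements A by slicing the text word-by-word at precomputed pi-digit lengths
-- (one slice per word) instead of growing the last word character-by-character; objective: simpler.

-- ===== PORT A =====
-- the pi-digit length table (nonnegative literals, kept as Nat; Python compares them with len())
def pilishLstA : List Nat := [3, 1, 4, 1, 5, 9, 2, 6, 5, 3, 5, 8, 9, 7, 9]

-- one step of A's for-loop; A's res is kept as (done = res[:-1], cur = res[-1]) plus count
def pilishStepA (s : List (List Char) × List Char × Nat) (x : Char) :
    List (List Char) × List Char × Nat :=
  let (done, cur, count) := s
  if cur.length < pilishLstA.getD count 0 then (done, cur ++ [x], count)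
  else (done ++ [cur], [x], count + 1)

-- A's while-loop 'while len(res[-1]) != lst[count]: res[-1] += res[-1][-1]', with fuel to make
-- it total (fuel = lst[count] suffices since cur is nonempty; the default ' ' of getLastD is
-- never read: cur is nonempty throughout)
def pilishPadA (fuel : Nat) (target : Nat) (cur : List Char) : List Char :=
  match fuel with
  | 0 => cur
  | f + 1 =>
      if cur.length ≠ target then pilishPadA f target (cur ++ [cur.getLastD ' ']) else cur

def pilish_string (txt : String) : String :=
  match txt.toList with
  | [] => ""                      -- if txt == '': return ''
  | c :: _ =>
      -- for x in txt[1:sum(lst)]: …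
      let body := PySem.List.slice txt.toList (some 1) (some (pilishLstA.sum : Int))
      let st := body.foldl pilishStepA ([], [c], 0)
      let target := pilishLstA.getD st.2.2 0
      String.ofList (PySem.Chars.join [' '] (st.1 ++ [pilishPadA target target st.2.1]))

-- ===== PORT B =====
def pilishLstB : List Nat := [3, 1, 4, 1, 5, 9, 2, 6, 5, 3, 5, 8, 9, 7, 9]

-- B's for-loop over the lengths, carrying the start offset; break once start >= len(txt)
def pilishLoopB : List Nat → Nat → List Char → List (List Char)
  | [], _, _ => []
  | l :: L, start, cs =>
      if start ≥ cs.length then []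
      else
        let chunk := PySem.List.slice cs (some (start : Int)) (some ((start : Int) + (l : Int)))
        let chunk' :=
          if chunk.length < l then
            chunk ++ PySem.List.pyRepeat [PySem.List.pyGetD chunk (-1) ' '] ((l : Int) - chunk.length)
          else chunk
        chunk' :: pilishLoopB L (start + l) cs

def pilish_string_alt (txt : String) : String :=
  match txt.toList with
  | [] => ""
  | _ :: _ => String.ofList (PySem.Chars.join [' '] (pilishLoopB pilishLstB 0 txt.toList))

-- ===== PRECONDITION & SPEC =====
def Spec_pilish_string (txt : String) (out : String) : Prop := out = pilish_string_alt txt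
instance (txt : String) (out : String) : Decidable (Spec_pilish_string txt out) := by unfold Spec_pilish_string; infer_instance

-- ===== CLAIM (what is proved, stated in full; the proofs are below) =====
def Claim_equal_pilish_string : Prop := ∀ (txt : String), Dom_pilish_string txt → Spec_pilish_string txt (pilish_string txt)

-- ===== LEMMAS AND PROOFS =====

-- common characterisation: split cs into padded chunks of the given lengths
def pChunks : List Nat → List Char → List (List Char)
  | [], _ => []
  | l :: L, cs =>
      if cs = [] then []
      else
        (if (cs.take l).length < l then
           cs.take l ++ List.replicate (l - (cs.take l).length) ((cs.take l).getLastD ' ')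
         else cs.take l) :: pChunks L (cs.drop l)

theorem headD_drop (xs : List Nat) (n : Nat) (d : Nat) : (xs.drop n).headD d = xs.getD n d := by
  induction xs generalizing n with
  | nil => simp
  | cons x xs ih =>
    cases n with
    | zero => simp
    | succ n => exact ih n

theorem pChunks_nil (L : List Nat) : pChunks L [] = [] := by
  cases L <;> simp [pChunks]

-- pChunks only looks at the first (sum of lengths) characters
theorem pChunks_take (L : List Nat) (cs : List Char) (hpos : ∀ l ∈ L, 1 ≤ l) :
    pChunks L (cs.take L.sum) = pChunks L cs := by
  induction L generalizing cs with
  | nil => simp [pChunks]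
  | cons l L ih =>
    by_cases hcs : cs = []
    · simp [hcs]
    · have h1 : 1 ≤ l := hpos l (by simp)
      have hne : cs.take (l :: L).sum ≠ [] := by
        cases cs with
        | nil => exact absurd rfl hcs
        | cons a as => simp [List.sum_cons]; omega
      have htt : (cs.take (l :: L).sum).take l = cs.take l := by
        rw [List.take_take]
        congr 1
        simp [List.sum_cons]
      have hdt : (cs.take (l :: L).sum).drop l = (cs.drop l).take L.sum := by
        rw [List.drop_take]
        congr 1
        simp [List.sum_cons]
      simp only [pChunks, hne, hcs, htt, hdt]
      rw [ih (cs.drop l) (fun x hx => hpos x (by simp [hx]))]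

-- the A-side loop, rephrased on the remaining lengths list
def aRun (L : List Nat) (cur : List Char) : List Char → List (List Char)
  | [] => [cur ++ List.replicate (L.headD 0 - cur.length) (cur.getLastD ' ')]
  | x :: cs' =>
      if cur.length < L.headD 0 then aRun L (cur ++ [x]) cs'
      else cur :: aRun L.tail [x] cs'

theorem getLast_eq_getLastD (xs : List Char) (h : xs ≠ []) (d : Char) :
    xs.getLastD d = xs.getLast h := by
  cases xs with
  | nil => exact absurd rfl h
  | cons a as => simp [List.getLastD_eq_getLast?, List.getLast?_eq_some_getLast]

-- A's while-loop pads cur with copies of its last character up to the target length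
theorem pilishPadA_eq (fuel target : Nat) (cur : List Char) (hne : cur ≠ [])
    (hle : cur.length ≤ target) (hf : target - cur.length ≤ fuel) :
    pilishPadA fuel target cur = cur ++ List.replicate (target - cur.length) (cur.getLastD ' ') := by
  induction fuel generalizing cur with
  | zero =>
    have : target = cur.length := by omega
    simp [pilishPadA, this]
  | succ f ih =>
    by_cases h : cur.length = target
    · simp [pilishPadA, h]
    · have hlt : cur.length < target := by omega
      have hlast : (cur ++ [cur.getLastD ' ']).getLastD ' ' = cur.getLastD ' ' :=
        List.getLastD_concat
      have hne' : cur ++ [cur.getLastD ' '] ≠ [] := by simp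
      rw [pilishPadA, if_pos (by omega)]
      rw [ih (cur ++ [cur.getLastD ' ']) hne' (by simp; omega) (by simp; omega)]
      rw [hlast, List.append_assoc]
      congr 1
      have : target - cur.length = (target - (cur.length + 1)) + 1 := by omega
      rw [this, List.replicate_succ]
      simp

-- A's foldl, finished by the pad, computes aRun on the lengths remaining after count
theorem foldA (cs : List Char) (done : List (List Char)) (cur : List Char) (count : Nat)
    (hne : cur ≠ []) (hcl : cur.length ≤ pilishLstA.getD count 0)
    (hct : count < pilishLstA.length)
    (hcap : cur.length + cs.length ≤ (pilishLstA.drop count).sum) :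
    (cs.foldl pilishStepA (done, cur, count)).1 ++
      [pilishPadA (pilishLstA.getD (cs.foldl pilishStepA (done, cur, count)).2.2 0)
        (pilishLstA.getD (cs.foldl pilishStepA (done, cur, count)).2.2 0)
        (cs.foldl pilishStepA (done, cur, count)).2.1]
    = done ++ aRun (pilishLstA.drop count) cur cs := by
  have hpos : ∀ k, k < pilishLstA.length → 1 ≤ pilishLstA.getD k 0 := by decide
  induction cs generalizing done cur count with
  | nil =>
    simp only [List.foldl_nil]
    rw [aRun]
    rw [pilishPadA_eq _ _ _ hne hcl (by omega)]
    rw [headD_drop]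
  | cons x cs' ih =>
    simp only [List.foldl_cons]
    rw [pilishStepA]
    by_cases h : cur.length < pilishLstA.getD count 0
    · simp only [if_pos h]
      rw [ih done (cur ++ [x]) count (by simp)
        (by simp only [List.length_append, List.length_cons, List.length_nil]; omega) hct
        (by simp only [List.length_append, List.length_cons, List.length_nil] at hcap ⊢; omega)]
      rw [aRun, if_pos (by rw [headD_drop]; exact h)]
    · simp only [if_neg h]
      have heq : cur.length = pilishLstA.getD count 0 := by omega
      have hdrop : pilishLstA.drop count = pilishLstA.getD count 0 :: pilishLstA.drop (count + 1) := by
        conv_lhs => rw [List.drop_eq_getElem_cons hct]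
        simp [List.getD_eq_getElem?_getD, List.getElem?_eq_getElem hct]
      have hcap' : 1 + cs'.length ≤ (pilishLstA.drop (count + 1)).sum := by
        rw [hdrop, List.sum_cons] at hcap
        simp only [List.length_cons] at hcap
        omega
      have hct' : count + 1 < pilishLstA.length := by
        by_contra hc
        have : pilishLstA.drop (count + 1) = [] := List.drop_eq_nil_of_le (by omega)
        rw [this] at hcap'
        simp at hcap'
      rw [ih (done ++ [cur]) [x] (count + 1) (by simp)
        (by simpa using hpos (count + 1) hct') hct' (by simpa using hcap')]
      rw [aRun, if_neg (by rw [headD_drop]; omega), hdrop]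
      simp

theorem aRun_eq_pChunks (cs : List Char) (L : List Nat) (cur : List Char)
    (hpos : ∀ l ∈ L, 1 ≤ l) (hL : L ≠ []) (hne : cur ≠ [])
    (hcl : cur.length ≤ L.headD 0) (hcap : cur.length + cs.length ≤ L.sum) :
    aRun L cur cs = pChunks L (cur ++ cs) := by
  induction cs generalizing L cur with
  | nil =>
    cases L with
    | nil => exact absurd rfl hL
    | cons l L' =>
      simp only [List.headD_cons] at hcl
      rw [aRun]
      have htake : (cur ++ ([] : List Char)).take l = cur := by
        simp [List.take_of_length_le (by simpa using hcl)]
      have hdropnil : pChunks L' ((cur ++ ([] : List Char)).drop l) = [] := by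
        rw [List.drop_eq_nil_of_le (by simpa using hcl), pChunks_nil]
      rw [pChunks, if_neg (by simp [hne]), htake, hdropnil]
      simp only [List.headD_cons]
      by_cases h : cur.length < l
      · rw [if_pos h]
      · rw [if_neg h]
        have hz : l - cur.length = 0 := by omega
        simp [hz]
  | cons x cs' ih =>
    cases L with
    | nil => exact absurd rfl hL
    | cons l L' =>
      simp only [List.headD_cons] at hcl
      rw [aRun]
      by_cases h : cur.length < l
      · rw [if_pos (by simpa using h)]
        rw [ih (l :: L') (cur ++ [x]) hpos hL (by simp) (by simp; omega)
          (by simp at hcap ⊢; omega)]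
        simp
      · have heq : cur.length = l := by omega
        rw [if_neg (by simpa using h)]
        have hL' : L' ≠ [] := by
          intro hc
          subst hc
          simp [List.sum_cons] at hcap
          omega
        have hcapIH : 1 + cs'.length ≤ L'.sum := by
          simp [List.sum_cons] at hcap
          omega
        have hheadL' : 1 ≤ L'.headD 0 := by
          cases L' with
          | nil => exact absurd rfl hL'
          | cons a as => simpa using hpos a (by simp)
        simp only [List.tail_cons]
        rw [ih L' [x] (fun y hy => hpos y (by simp [hy])) hL' (by simp) (by simpa using hheadL')
          (by simpa using hcapIH)]
        have htake : (cur ++ x :: cs').take l = cur := List.take_left' heq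
        have hdrop : (cur ++ x :: cs').drop l = x :: cs' := List.drop_left' heq
        rw [pChunks, if_neg (by simp [hne]), htake, hdrop, if_neg h]
        simp

-- B's loop computes pChunks of the suffix from start
theorem loopB_eq_pChunks (L : List Nat) (start : Nat) (cs : List Char)
    (hpos : ∀ l ∈ L, 1 ≤ l) :
    pilishLoopB L start cs = pChunks L (cs.drop start) := by
  induction L generalizing start with
  | nil => simp [pilishLoopB, pChunks]
  | cons l L' ih =>
    rw [pilishLoopB]
    by_cases h : start ≥ cs.length
    · rw [if_pos h]
      rw [List.drop_eq_nil_of_le h, pChunks_nil]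
    · rw [if_neg h]
      have hne : cs.drop start ≠ [] := by
        simp [List.drop_eq_nil_iff]
        omega
      have hslice : PySem.List.slice cs (some (start : Int)) (some ((start : Int) + (l : Int))) =
          (cs.drop start).take l := PySem.List.slice_natCast_add cs start l
      have h1 : 1 ≤ l := hpos l (by simp)
      have hchne : (cs.drop start).take l ≠ [] := by
        simp [List.take_eq_nil_iff]
        omega
      rw [pChunks, if_neg hne]
      rw [ih (start + l) (fun y hy => hpos y (by simp [hy]))]
      rw [List.drop_drop]
      simp only [hslice]
      congr 1
      by_cases hlt : ((cs.drop start).take l).length < l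
      · rw [if_pos hlt, if_pos hlt]
        congr 1
        rw [PySem.List.pyGetD_neg_one _ ' ' hchne, ← getLast_eq_getLastD _ hchne]
        rw [PySem.List.pyRepeat_singleton]
        congr 1
        omega
      · rw [if_neg hlt, if_neg hlt]

theorem slice_one_sum (cs : List Char) :
    PySem.List.slice cs (some 1) (some (pilishLstA.sum : Int)) = (cs.drop 1).take 76 := by
  rw [PySem.List.slice_toNat cs (by norm_num) (Int.natCast_nonneg _)]
  norm_num [pilishLstA]
  simp

-- ===== VERDICT (by name: the statement is the Claim_ definition above) =====
theorem pilish_string_spec : Claim_equal_pilish_string := by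
  intro txt _
  unfold Spec_pilish_string pilish_string pilish_string_alt
  cases htxt : txt.toList with
  | nil => rfl
  | cons c rest =>
    simp only []
    congr 1
    congr 1
    have hpos : ∀ l ∈ pilishLstA, 1 ≤ l := by decide
    have hbody : PySem.List.slice (c :: rest) (some 1) (some (pilishLstA.sum : Int)) =
        rest.take 76 := by
      rw [slice_one_sum]
      simp
    rw [hbody]
    have hcap76 : 1 + (rest.take 76).length ≤ (pilishLstA.drop 0).sum := by
      have := List.length_take_le 76 rest
      simp [pilishLstA]
      omega
    have hA := foldA (rest.take 76) [] [c] 0 (by simp) (by simp [pilishLstA])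
      (by simp [pilishLstA]) hcap76
    rw [hA]
    simp only [List.drop_zero] at hcap76
    have hA2 := aRun_eq_pChunks (rest.take 76) pilishLstA [c] hpos (by simp [pilishLstA])
      (by simp) (by simp [pilishLstA]) hcap76
    simp only [List.drop_zero, List.nil_append]
    rw [hA2]
    have hB := loopB_eq_pChunks pilishLstB 0 (c :: rest) (by decide)
    simp only [List.drop_zero] at hB
    rw [hB]
    have hBA : pilishLstB = pilishLstA := rfl
    rw [hBA]
    have hT := pChunks_take pilishLstA (c :: rest) hpos
    have hsum : pilishLstA.sum = 77 := by decide
    rw [hsum] at hT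
    calc pChunks pilishLstA ([c] ++ rest.take 76)
        = pChunks pilishLstA ((c :: rest).take 77) := by simp
      _ = pChunks pilishLstA (c :: rest) := hT
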